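-- pv_equiv track=rewrite | github.com/csinva/tpr-fmri | discover/create_digit_seqs.py | interleaved
-- ===== SOURCE A (Python) =====
-- def interleaved(sequence, start_right=False):
--     if len(sequence) <= 1:
--         return list(sequence)
--     else:
--         if start_right:
--             return [sequence[-1], sequence[0]] + interleaved(sequence[1:-1], start_right=start_right)
--         else:
--             return [sequence[0], sequence[-1]] + interleaved(sequence[1:-1], start_right=start_right)
-- ===== SOURCE B (Python) =====
-- def interleaved(sequence, start_right=False):
--     res = []
--     i, j = 0, len(sequence) - 1
--     while i < j:
--         if start_right:
--             res.append(sequence[j])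
--             res.append(sequence[i])
--         else:
--             res.append(sequence[i])
--             res.append(sequence[j])
--         i += 1
--         j -= 1
--     if i == j:
--         res.append(sequence[i])
--     return res
-- ===== Notes on version B (the rewrite author's own statement) =====
-- stated objective: faster
-- what changed: Replaced the recursion that copies the middle slice sequence[1:-1] at every level with a single two-pointer loop that appends from both ends inward, so no slices are created.
import Mathlib
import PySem

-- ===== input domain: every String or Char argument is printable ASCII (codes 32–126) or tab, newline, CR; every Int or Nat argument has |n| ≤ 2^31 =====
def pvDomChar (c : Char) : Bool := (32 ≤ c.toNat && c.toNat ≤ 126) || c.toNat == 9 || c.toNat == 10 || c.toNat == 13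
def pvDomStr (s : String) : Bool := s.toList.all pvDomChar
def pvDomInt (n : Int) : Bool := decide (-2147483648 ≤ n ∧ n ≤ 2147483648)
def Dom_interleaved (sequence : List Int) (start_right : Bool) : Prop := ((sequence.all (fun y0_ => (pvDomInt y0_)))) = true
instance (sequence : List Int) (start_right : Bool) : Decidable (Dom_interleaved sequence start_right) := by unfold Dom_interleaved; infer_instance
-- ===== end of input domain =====

-- B replaces A's recursion with per-level middle-slice copies by one two-pointer
-- index loop appending from both ends inward (objective: faster, O(n) vs O(n^2)).

-- ===== PORT A =====
-- A recurses on the middle slice sequence[1:-1]; for len(sequence) ≥ 2,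
-- sequence[0] is the head, sequence[-1] is (y :: rest).getLast (in range, exact),
-- and sequence[1:-1] is (y :: rest).dropLast (exactly PySem.List.slice at 1, -1 here).
def interleaved (sequence : List Int) (start_right : Bool) : List Int :=
  match sequence with
  | [] => []
  | [x] => [x]
  | x :: y :: rest =>
    let t := y :: rest
    let last := t.getLast (by simp)
    let mid := t.dropLast
    if start_right then
      last :: x :: interleaved mid start_right
    else
      x :: last :: interleaved mid start_right
termination_by sequence.length
decreasing_by simp

-- ===== PORT B =====
-- the while-loop of Source B; indices i, j are Python ints, always in range while used
-- (0 ≤ i ≤ j < len), so pyGetD _ _ 0 is exact here.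
def interleavedAltGo (sequence : List Int) (start_right : Bool) (i j : Int) (res : List Int) : List Int :=
  if i < j then
    let res' :=
      if start_right then
        res ++ [PySem.List.pyGetD sequence j 0, PySem.List.pyGetD sequence i 0]
      else
        res ++ [PySem.List.pyGetD sequence i 0, PySem.List.pyGetD sequence j 0]
    interleavedAltGo sequence start_right (i + 1) (j - 1) res'
  else if i = j then
    res ++ [PySem.List.pyGetD sequence i 0]
  else
    res
termination_by (j - i).toNat
decreasing_by omega

def interleaved_alt (sequence : List Int) (start_right : Bool) : List Int :=
  interleavedAltGo sequence start_right 0 ((sequence.length : Int) - 1) []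

-- ===== PRECONDITION & SPEC =====
def Spec_interleaved (sequence : List Int) (start_right : Bool) (out : List Int) : Prop := out = interleaved_alt sequence start_right
instance (sequence : List Int) (start_right : Bool) (out : List Int) : Decidable (Spec_interleaved sequence start_right out) := by unfold Spec_interleaved; infer_instance

-- ===== CLAIM (what is proved, stated in full; the proofs are below) =====
def Claim_equal_interleaved : Prop := ∀ (sequence : List Int) (start_right : Bool), Dom_interleaved sequence start_right → Spec_interleaved sequence start_right (interleaved sequence start_right)

-- ===== LEMMAS AND PROOFS =====

-- the segment s[a:b) as a list
def pvSeg (s : List Int) (a b : Nat) : List Int := (s.drop a).take (b - a)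

theorem pvSeg_cons (s : List Int) (a b : Nat) (ha : a < b) (hb : b ≤ s.length) :
    pvSeg s a b = s[a]'(by omega) :: pvSeg s (a + 1) b := by
  unfold pvSeg
  rw [List.drop_eq_getElem_cons (by omega)]
  rw [show b - a = (b - (a+1)) + 1 by omega, List.take_succ_cons]

theorem pvSeg_len (s : List Int) (a b : Nat) (hb : b ≤ s.length) :
    (pvSeg s a b).length = b - a := by
  unfold pvSeg
  rw [List.length_take, List.length_drop]
  omega

theorem pvSeg_dropLast (s : List Int) (a b : Nat) (ha : a < b) (hb : b ≤ s.length) :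
    (pvSeg s a b).dropLast = pvSeg s a (b - 1) := by
  unfold pvSeg
  rw [List.dropLast_eq_take, List.take_take, List.length_take, List.length_drop]
  congr 1
  omega

theorem pvSeg_ne_nil (s : List Int) (a b : Nat) (ha : a < b) (hb : b ≤ s.length) :
    pvSeg s a b ≠ [] := by
  have := pvSeg_len s a b hb
  intro hn
  rw [hn] at this
  simp at this
  omega

theorem pvSeg_getLast (s : List Int) (a b : Nat) (ha : a < b) (hb : b ≤ s.length)
    (h : pvSeg s a b ≠ []) : (pvSeg s a b).getLast h = s[b - 1]'(by omega) := by
  rw [List.getLast_eq_getElem]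
  unfold pvSeg
  rw [List.getElem_take, List.getElem_drop]
  congr 1
  rw [List.length_take, List.length_drop]
  omega

-- unfolding A's recursion
theorem interleaved_nil (b : Bool) : interleaved [] b = [] := by
  rw [interleaved.eq_def]

theorem interleaved_single (x : Int) (b : Bool) : interleaved [x] b = [x] := by
  rw [interleaved.eq_def]

theorem interleaved_cons2 (x y : Int) (rest : List Int) (b : Bool) :
    interleaved (x :: y :: rest) b =
      (if b then [(y::rest).getLast (by simp), x] else [x, (y::rest).getLast (by simp)])
        ++ interleaved ((y::rest).dropLast) b := by
  rw [interleaved.eq_def]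
  cases b <;> simp

-- unfolding A on a segment of length >= 2
theorem interleaved_seg_step (s : List Int) (b : Bool) (a e : Nat)
    (ha : a + 2 <= e) (he : e <= s.length) :
    interleaved (pvSeg s a e) b =
      (if b then [s[e-1]'(by omega), s[a]'(by omega)] else [s[a]'(by omega), s[e-1]'(by omega)])
        ++ interleaved (pvSeg s (a+1) (e-1)) b := by
  rw [pvSeg_cons s a e (by omega) he]
  rw [pvSeg_cons s (a+1) e (by omega) he]
  rw [interleaved_cons2]
  have hq : (s[a+1]'(by omega) :: pvSeg s (a+2) e).getLast? = some (s[e-1]'(by omega)) := by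
    rw [← pvSeg_cons s (a+1) e (by omega) he]
    rw [List.getLast?_eq_getLast_of_ne_nil (pvSeg_ne_nil s (a+1) e (by omega) he)]
    rw [pvSeg_getLast s (a+1) e (by omega) he]
  have hlast : (s[a+1]'(by omega) :: pvSeg s (a+2) e).getLast (by simp) = s[e-1]'(by omega) := by
    rw [List.getLast?_eq_getLast_of_ne_nil (List.cons_ne_nil _ _)] at hq
    exact Option.some.inj hq
  have hdrop : (s[a+1]'(by omega) :: pvSeg s (a+2) e).dropLast = pvSeg s (a+1) (e-1) := by
    rw [show (s[a+1]'(by omega) :: pvSeg s (a+2) e) = pvSeg s (a+1) e from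
      (pvSeg_cons s (a+1) e (by omega) he).symm]
    exact pvSeg_dropLast s (a+1) e (by omega) he
  rw [hlast, hdrop]

theorem pvGetD_eq (s : List Int) (i : Int) (h0 : 0 <= i) (h1 : i < s.length) :
    PySem.List.pyGetD s i 0 = s[i.toNat]'(by omega) :=
  PySem.List.pyGetD_eq_getElem s 0 h0 (by exact_mod_cast h1)

theorem altGo_eq (s : List Int) (b : Bool) :
    forall g (i j : Int) (res : List Int), 0 <= i -> j < s.length -> i <= j + 1 ->
      (j + 1 - i).toNat = g ->
      interleavedAltGo s b i j res = res ++ interleaved (pvSeg s i.toNat (j + 1).toNat) b := by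
  intro g
  induction g using Nat.strong_induction_on with
  | _ g ih =>
    intro i j res h0 hj hij hg
    by_cases hlt : i < j
    · -- loop step
      rw [interleavedAltGo]
      rw [if_pos hlt]
      rw [ih (g - 2) (by omega) (i+1) (j-1) _ (by omega) (by omega) (by omega) (by omega)]
      have hseg : interleaved (pvSeg s i.toNat (j+1).toNat) b =
          (if b then [s[(j+1).toNat - 1]'(by omega), s[i.toNat]'(by omega)]
           else [s[i.toNat]'(by omega), s[(j+1).toNat - 1]'(by omega)])
            ++ interleaved (pvSeg s (i.toNat + 1) ((j+1).toNat - 1)) b :=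
        interleaved_seg_step s b i.toNat (j+1).toNat (by omega) (by omega)
      have h1 : (i + 1).toNat = i.toNat + 1 := by omega
      have h2 : (j - 1 + 1).toNat = (j + 1).toNat - 1 := by omega
      rw [h1, h2, hseg]
      rw [pvGetD_eq s i h0 (by omega), pvGetD_eq s j (by omega) (by omega)]
      have hji : j.toNat = (j+1).toNat - 1 := by omega
      cases b <;> simp [hji]
    · by_cases heq : i = j
      · -- last single element
        rw [interleavedAltGo]
        rw [if_neg hlt, if_pos heq]
        subst heq
        rw [pvSeg_cons s i.toNat (i+1).toNat (by omega) (by omega)]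
        have hnil : pvSeg s (i.toNat + 1) (i + 1).toNat = [] := by
          unfold pvSeg
          rw [List.take_eq_nil_iff]
          left; omega
        rw [hnil, interleaved_single]
        rw [pvGetD_eq s i h0 (by omega)]
      · -- empty range: i = j + 1
        rw [interleavedAltGo]
        rw [if_neg hlt, if_neg heq]
        have hnil : pvSeg s i.toNat (j + 1).toNat = [] := by
          unfold pvSeg
          rw [List.take_eq_nil_iff]
          left; omega
        rw [hnil, interleaved_nil]
        simp

-- ===== VERDICT (by name: the statement is the Claim_ definition above) =====
theorem interleaved_spec : Claim_equal_interleaved := by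
  intro s b _
  unfold Spec_interleaved interleaved_alt
  rw [altGo_eq s b ((s.length : Int) - 1 + 1 - 0).toNat 0 ((s.length : Int) - 1) []
      (by omega) (by omega) (by omega) rfl]
  have : pvSeg s (0 : Int).toNat ((s.length : Int) - 1 + 1).toNat = s := by
    unfold pvSeg; simp
  rw [this]
  simp
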